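-- pv_equiv track=rewrite | github.com/metatensor/metatomic | python/metatomic_ase/src/metatomic_ase/_symmetry.py | _choose_quadrature
-- ===== SOURCE A (Python) =====
-- from typing import Dict, List, Optional, Tuple
--
-- def _choose_quadrature(L_max: int) -> Tuple[int, int]:
--     """
--     Choose a Lebedev quadrature order and number of in-plane rotations to integrate
--     spherical harmonics up to degree ``L_max``.
--
--     :param L_max: maximum spherical harmonic degree
--     :return: (lebedev_order, n_inplane_rotations)
--     """
--     # fmt: off
--     available = [
--         3, 5, 7, 9, 11, 13, 15, 17, 19, 21, 23, 25, 27, 29, 31, 35, 41,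
--         47, 53, 59, 65, 71, 77, 83, 89, 95, 101, 107, 113, 119, 125, 131,
--     ]
--     # fmt: on
--
--     # pick smallest order >= L_max
--     n = min(o for o in available if o >= L_max)
--     # minimal gamma count
--     K = 2 * L_max + 1
--     return n, K
-- ===== SOURCE B (Python) =====
-- def _choose_quadrature(L_max):
--     # fmt: off
--     available = [
--         3, 5, 7, 9, 11, 13, 15, 17, 19, 21, 23, 25, 27, 29, 31, 35, 41,
--         47, 53, 59, 65, 71, 77, 83, 89, 95, 101, 107, 113, 119, 125, 131,
--     ]
--     # fmt: on
--     # binary search for the leftmost order >= L_max (bisect_left by hand)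
--     lo, hi = 0, len(available)
--     while lo < hi:
--         mid = (lo + hi) // 2
--         if available[mid] < L_max:
--             lo = mid + 1
--         else:
--             hi = mid
--     return available[lo], 2 * L_max + 1
-- ===== Notes on version B (the rewrite author's own statement) =====
-- stated objective: alternative
-- what changed: Replaces the linear filter-then-min scan of the 32-entry order list with a hand-written leftmost binary search (bisect_left) on the sorted list.
import Mathlib
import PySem

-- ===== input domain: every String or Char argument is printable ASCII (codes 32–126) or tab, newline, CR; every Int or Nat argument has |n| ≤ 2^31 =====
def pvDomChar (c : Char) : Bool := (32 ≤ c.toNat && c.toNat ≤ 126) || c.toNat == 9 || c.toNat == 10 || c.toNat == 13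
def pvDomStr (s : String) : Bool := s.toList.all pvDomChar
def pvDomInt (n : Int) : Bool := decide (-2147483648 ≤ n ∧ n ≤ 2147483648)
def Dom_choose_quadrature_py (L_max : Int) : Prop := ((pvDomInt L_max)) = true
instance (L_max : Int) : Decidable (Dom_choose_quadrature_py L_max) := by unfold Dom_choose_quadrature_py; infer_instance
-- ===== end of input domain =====

-- B replaces A's linear filter-then-min over the sorted 32-entry constant list with a
-- hand-written leftmost binary search (bisect_left); objective: alternative algorithm.

-- ===== PORT A =====
def pvAvailable : List Int :=
  [3, 5, 7, 9, 11, 13, 15, 17, 19, 21, 23, 25, 27, 29, 31, 35, 41,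
   47, 53, 59, 65, 71, 77, 83, 89, 95, 101, 107, 113, 119, 125, 131]

-- `min(o for o in available if o >= L_max)`; `.getD 0` is unreachable inside Pre_
def choose_quadrature_py (L_max : Int) : Int × Int :=
  let n := (PySem.List.min? (pvAvailable.filter (fun o => L_max ≤ o)) (fun x => x)).getD 0
  (n, 2 * L_max + 1)

-- ===== PORT B =====
-- the while-loop of Source B: indices are the nonnegative ints lo, hi, kept as Nat;
-- `fuel` only bounds the iteration count for totality (hi - lo shrinks each step,
-- so fuel = 32 ≥ hi - lo is never exhausted)
def pvBisect (fuel : Nat) (L_max : Int) (lo hi : Nat) : Nat :=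
  match fuel with
  | 0 => lo
  | fuel + 1 =>
    if lo < hi then
      let mid := (lo + hi) / 2
      if pvAvailable.getD mid 0 < L_max then pvBisect fuel L_max (mid + 1) hi
      else pvBisect fuel L_max lo mid
    else lo

-- `available[lo]` via getD: lo ≤ 31 inside Pre_, so in range
def choose_quadrature_py_alt (L_max : Int) : Int × Int :=
  (pvAvailable.getD (pvBisect 32 L_max 0 32) 0, 2 * L_max + 1)

-- ===== PRECONDITION & SPEC =====
-- Pre_ excludes exactly L_max > 131, where A's `min()` gets an empty sequence and raises ValueError.
def Pre_choose_quadrature_py (L_max : Int) : Prop := L_max ≤ 131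
instance (L_max : Int) : Decidable (Pre_choose_quadrature_py L_max) := by unfold Pre_choose_quadrature_py; infer_instance
def pvWitness_choose_quadrature_py : Int := (7)

def Spec_choose_quadrature_py (L_max : Int) (out : Int × Int) : Prop := out = choose_quadrature_py_alt L_max
instance (L_max : Int) (out : Int × Int) : Decidable (Spec_choose_quadrature_py L_max out) := by unfold Spec_choose_quadrature_py; infer_instance

-- ===== CLAIM (what is proved, stated in full; the proofs are below) =====
def Claim_equal_choose_quadrature_py : Prop := ∀ (L_max : Int), Dom_choose_quadrature_py L_max → Pre_choose_quadrature_py L_max → Spec_choose_quadrature_py L_max (choose_quadrature_py L_max)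

-- ===== LEMMAS AND PROOFS =====

-- For L_max ≤ 3 every order qualifies: A's min is 3 and B's search returns index 0.
theorem pv_low (L_max : Int) (h : L_max ≤ 3) :
    choose_quadrature_py L_max = choose_quadrature_py_alt L_max := by
  have h3 : L_max ≤ 3 := h
  have h5 : L_max ≤ 5 := by omega
  have h7 : L_max ≤ 7 := by omega
  have h9 : L_max ≤ 9 := by omega
  have h11 : L_max ≤ 11 := by omega
  have h13 : L_max ≤ 13 := by omega
  have h15 : L_max ≤ 15 := by omega
  have h17 : L_max ≤ 17 := by omega
  have h19 : L_max ≤ 19 := by omega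
  have h21 : L_max ≤ 21 := by omega
  have h23 : L_max ≤ 23 := by omega
  have h25 : L_max ≤ 25 := by omega
  have h27 : L_max ≤ 27 := by omega
  have h29 : L_max ≤ 29 := by omega
  have h31 : L_max ≤ 31 := by omega
  have h35 : L_max ≤ 35 := by omega
  have h41 : L_max ≤ 41 := by omega
  have h47 : L_max ≤ 47 := by omega
  have h53 : L_max ≤ 53 := by omega
  have h59 : L_max ≤ 59 := by omega
  have h65 : L_max ≤ 65 := by omega
  have h71 : L_max ≤ 71 := by omega
  have h77 : L_max ≤ 77 := by omega
  have h83 : L_max ≤ 83 := by omega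
  have h89 : L_max ≤ 89 := by omega
  have h95 : L_max ≤ 95 := by omega
  have h101 : L_max ≤ 101 := by omega
  have h107 : L_max ≤ 107 := by omega
  have h113 : L_max ≤ 113 := by omega
  have h119 : L_max ≤ 119 := by omega
  have h125 : L_max ≤ 125 := by omega
  have h131 : L_max ≤ 131 := by omega
  have n3 : ¬ (3 < L_max) := by omega
  have n5 : ¬ (5 < L_max) := by omega
  have n7 : ¬ (7 < L_max) := by omega
  have n11 : ¬ (11 < L_max) := by omega
  have n19 : ¬ (19 < L_max) := by omega
  have n41 : ¬ (41 < L_max) := by omega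
  simp [choose_quadrature_py, choose_quadrature_py_alt, pvAvailable, List.filter,
    PySem.List.min?, pvBisect, h3, h5, h7, h9, h11, h13, h15, h17, h19, h21, h23, h25,
    h27, h29, h31, h35, h41, h47, h53, h59, h65, h71, h77, h83, h89, h95, h101, h107,
    h113, h119, h125, h131, n3, n5, n7, n11, n19, n41]

-- ===== VERDICT (by name: the statement is the Claim_ definition above) =====
set_option maxHeartbeats 2000000 in
theorem choose_quadrature_py_spec : Claim_equal_choose_quadrature_py := by
  intro L_max _hd hpre
  unfold Spec_choose_quadrature_py
  by_cases hlow : L_max ≤ 3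
  · exact pv_low L_max hlow
  · have h4 : 4 ≤ L_max := by omega
    have h131 : L_max ≤ 131 := hpre
    interval_cases L_max <;> decide
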